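-- pv_equiv track=rewrite | github.com/rob634/rmhgeoapi | services/zarr/handler_validate_source.py | _check_spatial_dims
-- ===== SOURCE A (Python) =====
-- _LAT_NAMES = {"lat", "latitude", "y"}
--
-- _LON_NAMES = {"lon", "longitude", "x"}
--
-- def _check_spatial_dims(dimensions: dict) -> tuple:
--     """
--     IV-H5: Verify dataset has at least one lat and one lon dimension.
--
--     Returns (lat_dim, lon_dim) or raises ValueError for early rejection
--     before expensive rechunk/pyramid steps.
--     """
--     lat_dim = lon_dim = None
--     for dim in dimensions:
--         dim_lower = dim.lower()
--         if dim_lower in _LAT_NAMES and lat_dim is None: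
--             lat_dim = dim
--         elif dim_lower in _LON_NAMES and lon_dim is None:
--             lon_dim = dim
--     if not lat_dim or not lon_dim:
--         raise ValueError(
--             f"Dataset has no recognisable spatial dimensions. "
--             f"Expected at least one of {sorted(_LAT_NAMES)} and one of "
--             f"{sorted(_LON_NAMES)}, but found only: {sorted(dimensions.keys())}. "
--             f"Non-spatial datasets cannot be processed by this pipeline."
--         )
--     return lat_dim, lon_dim
-- ===== SOURCE B (Python) =====
-- _LAT_NAMES = {"lat", "latitude", "y"}
--
-- _LON_NAMES = {"lon", "longitude", "x"}
--
-- def _check_spatial_dims(dimensions: dict) -> tuple: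
--     # Build an inverted index: lowered name -> (position, original key), first occurrence wins.
--     pos = {}
--     for i, d in enumerate(dimensions):
--         pos.setdefault(d.lower(), (i, d))
--     # Query the three candidate names on each side; earliest position wins.
--     lat_hits = [pos[n] for n in _LAT_NAMES if n in pos]
--     lon_hits = [pos[n] for n in _LON_NAMES if n in pos]
--     if not lat_hits or not lon_hits:
--         raise ValueError(
--             f"Dataset has no recognisable spatial dimensions. "
--             f"Expected at least one of {sorted(_LAT_NAMES)} and one of "
--             f"{sorted(_LON_NAMES)}, but found only: {sorted(dimensions.keys())}. "
--             f"Non-spatial datasets cannot be processed by this pipeline."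
--         )
--     return min(lat_hits)[1], min(lon_hits)[1]
-- ===== Notes on version B (the rewrite author's own statement) =====
-- stated objective: alternative
-- what changed: Instead of scanning the keys and testing each against the two name sets, B builds an inverted index (lowered name -> (position, key), first occurrence wins) in one pass, then queries only the three candidate names per side and returns the hit with the smallest position.
import Mathlib
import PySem

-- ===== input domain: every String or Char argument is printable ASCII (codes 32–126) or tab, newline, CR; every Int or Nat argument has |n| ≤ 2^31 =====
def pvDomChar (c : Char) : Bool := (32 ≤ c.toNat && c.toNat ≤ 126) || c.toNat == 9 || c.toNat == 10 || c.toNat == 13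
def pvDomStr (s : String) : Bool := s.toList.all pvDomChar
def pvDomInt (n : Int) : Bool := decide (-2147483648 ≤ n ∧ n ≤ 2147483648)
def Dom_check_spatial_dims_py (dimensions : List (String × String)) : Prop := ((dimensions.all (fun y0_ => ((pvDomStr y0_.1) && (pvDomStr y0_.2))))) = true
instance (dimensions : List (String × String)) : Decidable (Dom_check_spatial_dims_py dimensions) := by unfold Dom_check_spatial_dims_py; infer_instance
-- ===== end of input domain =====

-- B replaces A's per-key membership scan by an inverted index (lowered name ->
-- first (position, key)) queried at the three candidate names per side, the
-- earliest position winning; objective: alternative (same cost, different algorithm).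


-- ===== PORT A =====
-- _LAT_NAMES / _LON_NAMES (sets used only for membership; literal elements)
def pvLatNames : List String := ["lat", "latitude", "y"]
def pvLonNames : List String := ["lon", "longitude", "x"]

-- the body of A's for-loop, one step over the (lat_dim, lon_dim) state
def pvStepA (s : Option String × Option String) (p : String × String) : Option String × Option String :=
  let dimLower := PySem.Str.lower p.1
  if pvLatNames.contains dimLower && (s.1 == none) then (some p.1, s.2)
  else if pvLonNames.contains dimLower && (s.2 == none) then (s.1, some p.1)
  else s

def check_spatial_dims_py (dimensions : List (String × String)) : String × String :=
  let st := dimensions.foldl pvStepA (none, none)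
  -- `if not lat_dim or not lon_dim: raise ValueError(...)`: outside Pre_ (A raises); dummy value
  match st with
  | (some a, some b) => if a = "" ∨ b = "" then ("", "") else (a, b)
  | _ => ("", "")

-- ===== PORT B =====
-- _LAT_NAMES / _LON_NAMES as B's module constants
def pvLatNamesB : List String := ["lat", "latitude", "y"]
def pvLonNamesB : List String := ["lon", "longitude", "x"]

-- pos.setdefault(d.lower(), (i, d)) on one enumerated key
def pvStepB (d : PySem.Dict String (Int × String)) (q : Int × (String × String)) : PySem.Dict String (Int × String) :=
  d.setdefault (PySem.Str.lower q.2.1) (q.1, q.2.1)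

-- the inverted index `pos`
def pvIndex (dimensions : List (String × String)) : PySem.Dict String (Int × String) :=
  (PySem.List.enumerate dimensions).foldl pvStepB PySem.Dict.empty

-- Python tuple `<` on (int, str) pairs (lexicographic)
def pvTupLt (p q : Int × String) : Bool := p.1 < q.1 || (p.1 == q.1 && decide (p.2 < q.2))

-- Python `min` over a list of such pairs (first minimum; none on empty list)
def pvMin? (l : List (Int × String)) : Option (Int × String) :=
  match l with
  | [] => none
  | h :: t => some (t.foldl (fun m x => if pvTupLt x m then x else m) h)

def check_spatial_dims_py_alt (dimensions : List (String × String)) : String × String :=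
  let pos := pvIndex dimensions
  let latHits := pvLatNamesB.filterMap (fun n => pos.get? n)
  let lonHits := pvLonNamesB.filterMap (fun n => pos.get? n)
  -- `if not lat_hits or not lon_hits: raise ValueError(...)`: outside Pre_ (B raises); dummy value
  match pvMin? latHits with
  | none => ("", "")
  | some a =>
    match pvMin? lonHits with
    | none => ("", "")
    | some b => (a.2, b.2)

-- ===== PRECONDITION & SPEC =====
-- A raises ValueError exactly when no key lower-cases into _LAT_NAMES or none into _LON_NAMES.
def Pre_check_spatial_dims_py (dimensions : List (String × String)) : Prop :=
  (dimensions.any (fun p => (["lat", "latitude", "y"] : List String).contains (PySem.Str.lower p.1))) = true ∧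
  (dimensions.any (fun p => (["lon", "longitude", "x"] : List String).contains (PySem.Str.lower p.1))) = true
instance (dimensions : List (String × String)) : Decidable (Pre_check_spatial_dims_py dimensions) := by unfold Pre_check_spatial_dims_py; infer_instance

def pvWitness_check_spatial_dims_py : (List (String × String)) := [("Lat", "d0"), ("x", "d1")]

def Spec_check_spatial_dims_py (dimensions : List (String × String)) (out : String × String) : Prop := out = check_spatial_dims_py_alt dimensions
instance (dimensions : List (String × String)) (out : String × String) : Decidable (Spec_check_spatial_dims_py dimensions out) := by unfold Spec_check_spatial_dims_py; infer_instance

-- ===== CLAIM (what is proved, stated in full; the proofs are below) =====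
def Claim_equal_check_spatial_dims_py : Prop := ∀ (dimensions : List (String × String)), Dom_check_spatial_dims_py dimensions → Pre_check_spatial_dims_py dimensions → Spec_check_spatial_dims_py dimensions (check_spatial_dims_py dimensions)

-- ===== LEMMAS AND PROOFS =====

-- the lat-name and lon-name sets are disjoint
lemma pv_disjoint (s : String) :
    pvLatNames.contains s = true → pvLonNames.contains s = true → False := by
  intro h1 h2
  simp [pvLatNames, pvLonNames] at h1 h2
  rcases h1 with rfl | rfl | rfl <;> simp_all

-- A's loop state: each component is "kept if set, else the first matching key"
lemma pv_foldl_char (l : List (String × String)) (a b : Option String) :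
    l.foldl pvStepA (a, b) =
      (a.or ((l.find? (fun p => pvLatNames.contains (PySem.Str.lower p.1))).map (·.1)),
       b.or ((l.find? (fun p => pvLonNames.contains (PySem.Str.lower p.1))).map (·.1))) := by
  induction l generalizing a b with
  | nil => simp
  | cons p l ih =>
    by_cases h1 : PySem.Str.lower p.1 ∈ pvLatNames
    · have h2 : PySem.Str.lower p.1 ∉ pvLonNames := by
        intro h
        exact pv_disjoint _ (by simpa using h1) (by simpa using h)
      cases a with
      | none => simp [pvStepA, h1, h2, List.find?, ih]
      | some x => simp [pvStepA, h1, h2, List.find?, ih]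
    · by_cases h2 : PySem.Str.lower p.1 ∈ pvLonNames
      · cases b with
        | none => simp [pvStepA, h1, h2, List.find?, ih]
        | some x => simp [pvStepA, h1, h2, List.find?, ih]
      · simp [pvStepA, h1, h2, List.find?, ih]

-- the index dict looks up the first enumerated key with the given lowered name
lemma pv_index_char (l : List (Int × (String × String))) (d : PySem.Dict String (Int × String)) (n : String) :
    (l.foldl pvStepB d).get? n =
      (d.get? n).or ((l.find? (fun q => PySem.Str.lower q.2.1 == n)).map (fun q => (q.1, q.2.1))) := by
  induction l generalizing d with
  | nil => simp
  | cons q l ih =>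
    rw [List.foldl_cons]
    by_cases h : PySem.Str.lower q.2.1 = n
    · subst h
      rw [List.find?_cons_of_pos (by simp)]
      by_cases hc : d.contains (PySem.Str.lower q.2.1) = true
      · have hsd : pvStepB d q = d := by
          unfold pvStepB; apply PySem.Dict.setdefault_of_contains; exact hc
        rw [hsd, ih]
        obtain ⟨v, hv⟩ : ∃ v, d.get? (PySem.Str.lower q.2.1) = some v := by
          rw [PySem.Dict.contains_eq_isSome_get?] at hc
          exact Option.isSome_iff_exists.1 hc
        simp [hv]
      · have hcf : d.contains (PySem.Str.lower q.2.1) = false := by simpa using hc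
        have hnone : d.get? (PySem.Str.lower q.2.1) = none := by
          rw [PySem.Dict.contains_eq_isSome_get?] at hcf
          simpa using hcf
        have hsd : pvStepB d q = d.insert (PySem.Str.lower q.2.1) (q.1, q.2.1) := by
          unfold pvStepB; apply PySem.Dict.setdefault_of_not_contains; exact hcf
        rw [hsd, ih]
        simp [PySem.Dict.get?_insert_self, hnone]
    · rw [List.find?_cons_of_neg (by simp [h])]
      have hga : (pvStepB d q).get? n = d.get? n := by
        unfold pvStepB
        apply PySem.Dict.get?_setdefault_of_ne
        exact Ne.symm h
      rw [ih, hga]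

-- every index in `enumerate dims s` is at least s
lemma pv_enum_ge (dims : List (String × String)) (s : Int) (q : Int × (String × String))
    (hq : q ∈ PySem.List.enumerate dims s) : s ≤ q.1 := by
  rcases (PySem.List.mem_enumerate_iff _ _ _).1 hq with ⟨k, hk, rfl⟩
  show s ≤ s + (k : Int)
  omega

-- filterMap only looks at the function's values on the list
lemma pv_filterMap_congr {α β : Type} (l : List α) (f g : α → Option β)
    (h : ∀ a ∈ l, f a = g a) : l.filterMap f = l.filterMap g := by
  induction l with
  | nil => rfl
  | cons a l ih =>
    rw [List.filterMap_cons, List.filterMap_cons, h a (by simp),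
      ih (fun a ha => h a (by simp [ha]))]

-- Python's min-fold returns x if x is reachable and index-below everything
lemma pv_fold_min : ∀ (t : List (Int × String)) (x m : Int × String),
    (∀ y ∈ t, x = y ∨ x.1 < y.1) →
    (m = x ∨ (x ∈ t ∧ (x = m ∨ x.1 < m.1))) →
    t.foldl (fun m x => if pvTupLt x m then x else m) m = x := by
  intro t
  induction t with
  | nil =>
    intro x m _ hm
    rcases hm with rfl | ⟨hx, _⟩
    · rfl
    · simp at hx
  | cons z t ih =>
    intro x m hall hm
    have hz : x = z ∨ x.1 < z.1 := hall z (by simp)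
    have hall' : ∀ y ∈ t, x = y ∨ x.1 < y.1 := fun y hy => hall y (by simp [hy])
    rw [List.foldl_cons]
    by_cases hb : pvTupLt z m = true
    · rw [if_pos hb]
      apply ih x z hall'
      rcases hm with hmx | ⟨hxt, hc⟩
      · -- the accumulator was already x, yet z beat it: z must be x itself
        rcases hz with hzx | hlt
        · exact Or.inl hzx.symm
        · exfalso
          rw [hmx] at hb
          simp [pvTupLt] at hb
          rcases hb with h | ⟨h, _⟩ <;> omega
      · rcases List.mem_cons.1 hxt with hxz | hxt'
        · exact Or.inl hxz.symm
        · exact Or.inr ⟨hxt', hz⟩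
    · rw [if_neg hb]
      apply ih x m hall'
      rcases hm with hmx | ⟨hxt, hc⟩
      · exact Or.inl hmx
      · rcases List.mem_cons.1 hxt with hxz | hxt'
        · -- x is z, yet z failed to beat the accumulator: x already equals it
          rcases hc with hcm | hlt
          · exact Or.inl hcm.symm
          · exfalso
            apply hb
            rw [← hxz]
            simp [pvTupLt, hlt]
        · exact Or.inr ⟨hxt', hc⟩

-- Python min returns x if x is in the list and strictly index-below everything else
lemma pv_min_of_least (l : List (Int × String)) (x : Int × String)
    (hx : x ∈ l) (hmin : ∀ y ∈ l, x = y ∨ x.1 < y.1) : pvMin? l = some x := by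
  cases l with
  | nil => simp at hx
  | cons h t =>
    have hm : h = x ∨ (x ∈ t ∧ (x = h ∨ x.1 < h.1)) := by
      rcases List.mem_cons.1 hx with rfl | hx'
      · exact Or.inl rfl
      · exact Or.inr ⟨hx', hmin h (by simp)⟩
    exact congrArg some (pv_fold_min t x h (fun y hy => hmin y (by simp [hy])) hm)

-- min over the per-name first hits = the overall first hit (any name of S)
lemma pv_min_hits (S : List String) (dims : List (String × String)) (s : Int) :
    pvMin? (S.filterMap (fun n =>
        ((PySem.List.enumerate dims s).find? (fun q => PySem.Str.lower q.2.1 == n)).map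
          (fun q => (q.1, q.2.1)))) =
      ((PySem.List.enumerate dims s).find? (fun q => S.contains (PySem.Str.lower q.2.1))).map
        (fun q => (q.1, q.2.1)) := by
  induction dims generalizing s with
  | nil => simp [PySem.List.enumerate_nil, pvMin?]
  | cons p dims ih =>
    rw [PySem.List.enumerate_cons]
    by_cases hS : S.contains (PySem.Str.lower p.1) = true
    · -- head matches: the overall first hit is (s, p.1), the least of all hits
      rw [List.find?_cons_of_pos (by simpa using hS)]
      show pvMin? _ = some ((s : Int), p.1)
      apply pv_min_of_least
      · refine List.mem_filterMap.2 ⟨PySem.Str.lower p.1, by simpa using hS, ?_⟩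
        rw [List.find?_cons_of_pos (by simp)]
        rfl
      · intro y hy
        rcases List.mem_filterMap.1 hy with ⟨n, hn, hfind⟩
        by_cases hn' : PySem.Str.lower p.1 = n
        · rw [← hn', List.find?_cons_of_pos (by simp)] at hfind
          have h2 : ((s : Int), p.1) = y := by injection hfind
          exact Or.inl h2
        · rw [List.find?_cons_of_neg (by simp [hn'])] at hfind
          cases hfq : (PySem.List.enumerate dims (s + 1)).find?
              (fun q => PySem.Str.lower q.2.1 == n) with
          | none => rw [hfq] at hfind; simp at hfind
          | some q =>
            rw [hfq] at hfind
            have h2 : (q.1, q.2.1) = y := by injection hfind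
            have hq1 : s + 1 ≤ q.1 :=
              pv_enum_ge dims (s + 1) q (List.mem_of_find?_eq_some hfq)
            right
            rw [← h2]
            show s < q.1
            omega
    · -- head matches no name: every search skips it
      have hS' : S.contains (PySem.Str.lower p.1) = false := by simpa using hS
      rw [List.find?_cons_of_neg (by simpa using hS)]
      have hcong := pv_filterMap_congr S
        (fun n => ((((s, p) :: PySem.List.enumerate dims (s + 1)).find?
            (fun q => PySem.Str.lower q.2.1 == n)).map (fun q => (q.1, q.2.1))))
        (fun n => (((PySem.List.enumerate dims (s + 1)).find?
            (fun q => PySem.Str.lower q.2.1 == n)).map (fun q => (q.1, q.2.1))))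
        (fun n hn => by
          have hne : PySem.Str.lower p.1 ≠ n := by
            intro h; apply hS; rw [h]; simpa using hn
          dsimp only
          rw [List.find?_cons_of_neg (by simp [hne])])
      rw [hcong]
      exact ih (s + 1)

-- dropping the indices from the enumerated search gives the plain search
lemma pv_find_enum (dims : List (String × String)) (s : Int) (pr : String × String → Bool) :
    ((PySem.List.enumerate dims s).find? (fun q => pr q.2)).map (fun q => q.2) =
      dims.find? pr := by
  induction dims generalizing s with
  | nil => simp [PySem.List.enumerate_nil]
  | cons p dims ih =>
    rw [PySem.List.enumerate_cons]
    by_cases h : pr p = true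
    · rw [List.find?_cons_of_pos (by simpa using h), List.find?_cons_of_pos h]
      rfl
    · rw [List.find?_cons_of_neg (by simpa using h), List.find?_cons_of_neg h]
      exact ih (s + 1)

-- a key whose lowering is a recognised name is non-empty
lemma pv_match_ne_empty (a : String) (S : List String) (hS : S = pvLatNames ∨ S = pvLonNames)
    (h : S.contains (PySem.Str.lower a) = true) : a ≠ "" := by
  intro ha
  subst ha
  rcases hS with rfl | rfl <;> revert h <;> decide

-- ===== VERDICT (by name: the statement is the Claim_ definition above) =====
theorem check_spatial_dims_py_spec : Claim_equal_check_spatial_dims_py := by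
  intro dims _ hpre
  obtain ⟨hlat, hlon⟩ := hpre
  unfold Spec_check_spatial_dims_py check_spatial_dims_py check_spatial_dims_py_alt
  rw [pv_foldl_char]
  -- the overall first matches exist by Pre_
  obtain ⟨pl, hpl⟩ : ∃ pl, dims.find? (fun p => pvLatNames.contains (PySem.Str.lower p.1)) = some pl :=
    Option.isSome_iff_exists.1 (List.find?_isSome.2 (by
      rcases List.any_eq_true.1 hlat with ⟨x, hx, hpx⟩; exact ⟨x, hx, hpx⟩))
  obtain ⟨po, hpo⟩ : ∃ po, dims.find? (fun p => pvLonNames.contains (PySem.Str.lower p.1)) = some po :=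
    Option.isSome_iff_exists.1 (List.find?_isSome.2 (by
      rcases List.any_eq_true.1 hlon with ⟨x, hx, hpx⟩; exact ⟨x, hx, hpx⟩))
  -- their enumerated counterparts
  obtain ⟨ql, hql, hql2⟩ : ∃ q, (PySem.List.enumerate dims).find?
      (fun q => pvLatNamesB.contains (PySem.Str.lower q.2.1)) = some q ∧ q.2 = pl := by
    have h := pv_find_enum dims 0 (fun p => pvLatNamesB.contains (PySem.Str.lower p.1))
    simp only [] at h
    have hpl2 : dims.find? (fun p => pvLatNamesB.contains (PySem.Str.lower p.1)) = some pl := hpl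
    rw [hpl2] at h
    cases hfq : (PySem.List.enumerate dims).find?
        (fun q => pvLatNamesB.contains (PySem.Str.lower q.2.1)) with
    | none => rw [hfq] at h; simp at h
    | some q => rw [hfq] at h; exact ⟨q, rfl, by simpa using h⟩
  obtain ⟨qo, hqo, hqo2⟩ : ∃ q, (PySem.List.enumerate dims).find?
      (fun q => pvLonNamesB.contains (PySem.Str.lower q.2.1)) = some q ∧ q.2 = po := by
    have h := pv_find_enum dims 0 (fun p => pvLonNamesB.contains (PySem.Str.lower p.1))
    simp only [] at h
    have hpo2 : dims.find? (fun p => pvLonNamesB.contains (PySem.Str.lower p.1)) = some po := hpo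
    rw [hpo2] at h
    cases hfq : (PySem.List.enumerate dims).find?
        (fun q => pvLonNamesB.contains (PySem.Str.lower q.2.1)) with
    | none => rw [hfq] at h; simp at h
    | some q => rw [hfq] at h; exact ⟨q, rfl, by simpa using h⟩
  -- rewrite B's hit lists through the index characterisation
  have hposchar : ∀ n, (pvIndex dims).get? n =
      ((PySem.List.enumerate dims).find? (fun q => PySem.Str.lower q.2.1 == n)).map
        (fun q => (q.1, q.2.1)) := by
    intro n; unfold pvIndex; rw [pv_index_char]; simp
  have hBlat : pvMin? (pvLatNamesB.filterMap (fun n => (pvIndex dims).get? n)) =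
      some (ql.1, pl.1) := by
    rw [pv_filterMap_congr _ _ _ (fun n _ => hposchar n), pv_min_hits, hql, ← hql2]
    rfl
  have hBlon : pvMin? (pvLonNamesB.filterMap (fun n => (pvIndex dims).get? n)) =
      some (qo.1, po.1) := by
    rw [pv_filterMap_congr _ _ _ (fun n _ => hposchar n), pv_min_hits, hqo, ← hqo2]
    rfl
  -- matched keys are non-empty, so A's `not` guard does not fire
  have hplne : pl.1 ≠ "" :=
    pv_match_ne_empty pl.1 pvLatNames (Or.inl rfl) (by simpa using List.find?_some hpl)
  have hpone : po.1 ≠ "" :=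
    pv_match_ne_empty po.1 pvLonNames (Or.inr rfl) (by simpa using List.find?_some hpo)
  have hpl' : List.find? (fun p => decide (PySem.Str.lower p.1 ∈ pvLatNames)) dims = some pl := by
    simpa using hpl
  have hpo' : List.find? (fun p => decide (PySem.Str.lower p.1 ∈ pvLonNames)) dims = some po := by
    simpa using hpo
  simp [hpl', hpo', hBlat, hBlon, hplne, hpone]
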